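-- pv_equiv track=rewrite | github.com/LEE-CHENYU/Instagram-Network_scraping_and_analysis | essentialRoutines.py | check_if_stuck
-- ===== SOURCE A (Python) =====
-- from collections import Counter
--
-- def check_if_stuck(prev_scrape_sizes, new_scrape_size):
--     occurences = Counter(prev_scrape_sizes)
--     for v in occurences.values():
--         if v > 38:
--             return (True,prev_scrape_sizes)
--
--     if len(prev_scrape_sizes) >= 40:
--         del prev_scrape_sizes[0]
--     prev_scrape_sizes.append(new_scrape_size)
--
--     return (False, prev_scrape_sizes)
-- ===== SOURCE B (Python) =====
-- def check_if_stuck(prev_scrape_sizes, new_scrape_size):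
--     # Sort a copy; a value occurs more than 38 times iff in the sorted order
--     # some element equals the one 38 positions earlier.
--     s = sorted(prev_scrape_sizes)
--     for i in range(38, len(s)):
--         if s[i - 38] == s[i]:
--             return (True, prev_scrape_sizes)
--     # Bounded-list maintenance: append first, then trim (same final list as A).
--     prev_scrape_sizes.append(new_scrape_size)
--     if len(prev_scrape_sizes) > 40:
--         del prev_scrape_sizes[0]
--     return (False, prev_scrape_sizes)
-- ===== Notes on version B (the rewrite author's own statement) =====
-- stated objective: alternative
-- what changed: Replaces the Counter hash-count pass with a sort of a copy plus an index scan comparing each sorted element with the one 38 positions earlier, and reverses the tail maintenance to append-then-trim instead of delete-then-append.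
import Mathlib
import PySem

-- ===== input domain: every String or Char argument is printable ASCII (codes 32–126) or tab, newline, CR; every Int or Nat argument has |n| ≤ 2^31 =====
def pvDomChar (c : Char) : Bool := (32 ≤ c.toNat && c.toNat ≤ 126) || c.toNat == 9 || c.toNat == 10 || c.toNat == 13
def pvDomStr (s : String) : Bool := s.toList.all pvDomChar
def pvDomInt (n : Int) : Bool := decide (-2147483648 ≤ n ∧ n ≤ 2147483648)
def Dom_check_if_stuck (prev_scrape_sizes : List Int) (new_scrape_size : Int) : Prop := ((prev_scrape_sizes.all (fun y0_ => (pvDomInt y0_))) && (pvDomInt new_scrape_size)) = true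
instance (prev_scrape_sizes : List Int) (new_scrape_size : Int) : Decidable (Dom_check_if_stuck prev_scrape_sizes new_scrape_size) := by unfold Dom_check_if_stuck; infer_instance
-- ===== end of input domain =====

-- B replaces the Counter pass by an index scan over a sorted copy (compare each sorted element with
-- the one 38 positions earlier) and appends-then-trims the rolling list instead of delete-then-append.
-- Both Pythons mutate prev_scrape_sizes to the same final list; the theorem is about the return value.

-- ===== PORT A =====
def check_if_stuck (prev_scrape_sizes : List Int) (new_scrape_size : Int) : Bool × List Int :=
  let occurences := PySem.Dict.counter prev_scrape_sizes
  -- for v in occurences.values(): if v > 38: return (True, prev_scrape_sizes)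
  if occurences.values.any (fun v => decide (v > 38)) then
    (true, prev_scrape_sizes)
  else
    let l := if prev_scrape_sizes.length ≥ 40 then prev_scrape_sizes.drop 1 else prev_scrape_sizes
    (false, l ++ [new_scrape_size])

-- ===== PORT B =====
def check_if_stuck_alt (prev_scrape_sizes : List Int) (new_scrape_size : Int) : Bool × List Int :=
  let s := PySem.List.sorted prev_scrape_sizes (fun x => x) false
  -- for i in range(38, len(s)): if s[i - 38] == s[i]: return (True, prev_scrape_sizes)
  -- (indices are always in range here, so pyGetD with default 0 is exact)
  if (PySem.List.pyRange 38 (s.length : Int) 1).any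
      (fun i => PySem.List.pyGetD s (i - 38) 0 == PySem.List.pyGetD s i 0) then
    (true, prev_scrape_sizes)
  else
    let t := prev_scrape_sizes ++ [new_scrape_size]
    if t.length > 40 then (false, t.drop 1) else (false, t)

-- ===== PRECONDITION & SPEC =====
def Spec_check_if_stuck (prev_scrape_sizes : List Int) (new_scrape_size : Int) (out : Bool × List Int) : Prop := out = check_if_stuck_alt prev_scrape_sizes new_scrape_size
instance (prev_scrape_sizes : List Int) (new_scrape_size : Int) (out : Bool × List Int) : Decidable (Spec_check_if_stuck prev_scrape_sizes new_scrape_size out) := by unfold Spec_check_if_stuck; infer_instance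

-- ===== CLAIM (what is proved, stated in full; the proofs are below) =====
def Claim_equal_check_if_stuck : Prop := ∀ (prev_scrape_sizes : List Int) (new_scrape_size : Int), Dom_check_if_stuck prev_scrape_sizes new_scrape_size → Spec_check_if_stuck prev_scrape_sizes new_scrape_size (check_if_stuck prev_scrape_sizes new_scrape_size)

-- ===== LEMMAS AND PROOFS =====

theorem condA_iff (xs : List Int) :
    ((PySem.Dict.counter xs).values.any (fun v => decide (v > 38)) = true) ↔ ∃ x ∈ xs, 38 < xs.count x := by
  simp only [PySem.Dict.values, PySem.Dict.items_counter, List.map_map, List.any_map,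
    List.any_eq_true, PySem.Set.mem_ofList, Function.comp]
  constructor
  · rintro ⟨x, hx, hd⟩
    exact ⟨x, hx, by simpa using hd⟩
  · rintro ⟨x, hx, hd⟩
    exact ⟨x, hx, by simpa using hd⟩

theorem window_of_count {s : List Int} (hs : s.Pairwise (· ≤ ·)) {x : Int} (h : 39 ≤ s.count x) :
    ∃ i, ∃ h38 : i + 38 < s.length, s[i]'(by omega) = s[i + 38]'h38 := by
  classical
  have h1 : List.Perm (s.filter (fun y => decide (y < x)) ++ s.filter (fun y => !decide (y < x))) s :=
    List.filter_append_perm _ s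
  have h2 : List.Perm ((s.filter (fun y => !decide (y < x))).filter (fun y => y == x) ++
      (s.filter (fun y => !decide (y < x))).filter (fun y => !(y == x)))
      (s.filter (fun y => !decide (y < x))) := List.filter_append_perm _ _
  have e1 : (s.filter (fun y => !decide (y < x))).filter (fun y => y == x) =
      List.replicate (s.count x) x := by
    rw [List.filter_filter]
    have : s.filter (fun y => (y == x) && !decide (y < x)) = s.filter (fun y => y == x) := by
      apply List.filter_congr
      intro y _
      rw [Bool.eq_iff_iff]
      simp only [Bool.and_eq_true, Bool.not_eq_true', decide_eq_false_iff_not, beq_iff_eq]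
      omega
    rw [this, List.filter_beq, List.count]
  have e2 : (s.filter (fun y => !decide (y < x))).filter (fun y => !(y == x)) =
      s.filter (fun y => decide (x < y)) := by
    rw [List.filter_filter]
    apply List.filter_congr
    intro y _
    rw [Bool.eq_iff_iff]
    simp only [Bool.and_eq_true, Bool.not_eq_true', decide_eq_false_iff_not, beq_eq_false_iff_ne,
      ne_eq, decide_eq_true_eq]
    omega
  have hperm : List.Perm (s.filter (fun y => decide (y < x)) ++
      (List.replicate (s.count x) x ++ s.filter (fun y => decide (x < y)))) s := by
    rw [e1, e2] at h2
    exact (List.Perm.append_left _ h2).trans h1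
  have hsorted : (s.filter (fun y => decide (y < x)) ++
      (List.replicate (s.count x) x ++ s.filter (fun y => decide (x < y)))).Pairwise (· ≤ ·) := by
    rw [List.pairwise_append, List.pairwise_append]
    refine ⟨hs.filter _, ⟨List.pairwise_replicate.2 (Or.inr le_rfl), hs.filter _, ?_⟩, ?_⟩
    · intro a ha b hb
      have hae := List.eq_of_mem_replicate ha
      have hbe := (List.mem_filter.1 hb).2
      simp only [decide_eq_true_eq] at hbe
      omega
    · intro a ha b hb
      have hae := (List.mem_filter.1 ha).2
      simp only [decide_eq_true_eq] at hae
      rcases List.mem_append.1 hb with hb | hb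
      · have hbe := List.eq_of_mem_replicate hb
        omega
      · have hbe := (List.mem_filter.1 hb).2
        simp only [decide_eq_true_eq] at hbe
        omega
  have heq : s = s.filter (fun y => decide (y < x)) ++
      (List.replicate (s.count x) x ++ s.filter (fun y => decide (x < y))) :=
    (hperm.eq_of_pairwise (fun _ _ _ _ ha hb => le_antisymm ha hb) hsorted hs).symm
  have hlen := congrArg List.length heq
  simp only [List.length_append, List.length_replicate] at hlen
  have key : ∀ m, m < s.count x →
      ∀ hq : (s.filter (fun y => decide (y < x))).length + m < s.length,
      s[(s.filter (fun y => decide (y < x))).length + m]'hq = x := by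
    intro m hm hq
    rw [List.getElem_of_eq heq, List.getElem_append_right (by omega),
      List.getElem_append_left (by simp; omega)]
    simp
  refine ⟨(s.filter (fun y => decide (y < x))).length, by omega, ?_⟩
  have k0 := key 0 (by omega) (by omega)
  have k38 := key 38 (by omega) (by omega)
  simp only [Nat.add_zero] at k0
  rw [k0, k38]

theorem count_of_window {s : List Int} (hs : s.Pairwise (· ≤ ·)) {i : Nat} (h38 : i + 38 < s.length)
    (he : s[i]'(by omega) = s[i + 38]'h38) : 39 ≤ s.count (s[i]'(by omega)) := by
  have hmono : ∀ p q (hpq : p ≤ q) (hq : q < s.length), s[p]'(by omega) ≤ s[q]'hq := by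
    intro p q hpq hq
    rcases Nat.eq_or_lt_of_le hpq with h | h
    · subst h; exact le_refl _
    · exact List.pairwise_iff_getElem.1 hs p q (by omega) hq h
  have ht : (s.drop i).take 39 = List.replicate 39 (s[i]'(by omega)) := by
    apply List.eq_replicate_iff.2
    constructor
    · simp; omega
    · intro b hb
      obtain ⟨j, hj, hjb⟩ := List.mem_iff_getElem.1 hb
      have hjl : j < 39 ∧ i + j < s.length := by
        simp [List.length_take, List.length_drop] at hj
        omega
      have hjs : i + j < s.length := hjl.2
      have : b = s[i + j]'hjs := by
        rw [← hjb]; simp [List.getElem_take, List.getElem_drop]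
      rw [this]
      have h1 : s[i]'(by omega) ≤ s[i + j]'hjs := hmono i (i + j) (by omega) hjs
      have h2 : s[i + j]'hjs ≤ s[i + 38]'h38 := hmono (i + j) (i + 38) (by omega) h38
      rw [← he] at h2
      omega
  have hsub : ((s.drop i).take 39).Sublist s :=
    (List.take_sublist _ _).trans (List.drop_sublist _ _)
  have := hsub.count_le (s[i]'(by omega))
  rw [ht] at this
  simpa using this

theorem condB_iff (xs : List Int) :
    ((PySem.List.pyRange 38 (((PySem.List.sorted xs (fun x => x) false).length : Int)) 1).any
        (fun i => PySem.List.pyGetD (PySem.List.sorted xs (fun x => x) false) (i - 38) 0 ==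
                  PySem.List.pyGetD (PySem.List.sorted xs (fun x => x) false) i 0) = true)
      ↔ ∃ x ∈ xs, 38 < xs.count x := by
  have hperm : (PySem.List.sorted xs (fun x => x) false).Perm xs := PySem.List.sorted_perm ..
  have hs : (PySem.List.sorted xs (fun x => x) false).Pairwise (· ≤ ·) := by
    simpa using PySem.List.sorted_pairwise (xs := xs) (key := fun x => x)
  set s := PySem.List.sorted xs (fun x => x) false with hsdef
  rw [List.any_eq_true]
  constructor
  · rintro ⟨i, hi, hb⟩
    rw [PySem.List.mem_pyRange_one] at hi
    have g1 : PySem.List.pyGetD s (i - 38) 0 = s[(i - 38).toNat]'(by omega) :=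
      PySem.List.pyGetD_eq_getElem (i := i - 38) s 0 (by omega) (by omega)
    have g2 : PySem.List.pyGetD s i 0 = s[i.toNat]'(by omega) :=
      PySem.List.pyGetD_eq_getElem (i := i) s 0 (by omega) (by omega)
    have hnat : i.toNat = (i - 38).toNat + 38 := by omega
    have h38 : (i - 38).toNat + 38 < s.length := by omega
    have he : s[(i - 38).toNat]'(by omega) = s[(i - 38).toNat + 38]'h38 := by
      rw [g1, g2] at hb
      have := beq_iff_eq.1 hb
      simpa [hnat] using this
    have hc := count_of_window hs h38 he
    refine ⟨s[(i - 38).toNat]'(by omega), hperm.subset (List.getElem_mem _), ?_⟩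
    have := hperm.count_eq (s[(i - 38).toNat]'(by omega))
    omega
  · rintro ⟨x, hx, hcnt⟩
    have h39 : 39 ≤ s.count x := by
      have := hperm.count_eq x
      omega
    obtain ⟨i, hi38, he⟩ := window_of_count hs h39
    refine ⟨(i : Int) + 38, ?_, ?_⟩
    · rw [PySem.List.mem_pyRange_one]; omega
    · have g1 : PySem.List.pyGetD s ((i : Int) + 38 - 38) 0 = s[i]'(by omega) := by
        rw [PySem.List.pyGetD_eq_getElem (i := (i : Int) + 38 - 38) s 0 (by omega) (by omega)]
        congr 1; omega
      have g2 : PySem.List.pyGetD s ((i : Int) + 38) 0 = s[i + 38]'hi38 := by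
        rw [PySem.List.pyGetD_eq_getElem (i := (i : Int) + 38) s 0 (by omega) (by omega)]
        simp only [show ((i : Int) + 38).toNat = i + 38 from by omega]
      rw [g1, g2]
      exact beq_iff_eq.2 he

theorem cond_eq (xs : List Int) :
    (PySem.Dict.counter xs).values.any (fun v => decide (v > 38)) =
    (PySem.List.pyRange 38 (((PySem.List.sorted xs (fun x => x) false).length : Int)) 1).any
      (fun i => PySem.List.pyGetD (PySem.List.sorted xs (fun x => x) false) (i - 38) 0 ==
                PySem.List.pyGetD (PySem.List.sorted xs (fun x => x) false) i 0) := by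
  rw [Bool.eq_iff_iff, condA_iff, condB_iff]

theorem tail_eq (xs : List Int) (n : Int) :
    ((if xs.length ≥ 40 then xs.drop 1 else xs) ++ [n]) =
    (if (xs ++ [n]).length > 40 then (xs ++ [n]).drop 1 else xs ++ [n]) := by
  by_cases h : xs.length ≥ 40
  · rw [if_pos h, if_pos (by simp; omega), List.drop_append_of_le_length (by omega)]
  · rw [if_neg h, if_neg (by simp; omega)]

-- ===== VERDICT (by name: the statement is the Claim_ definition above) =====
theorem check_if_stuck_spec : Claim_equal_check_if_stuck := by
  intro xs n _
  unfold Spec_check_if_stuck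
  simp only [check_if_stuck, check_if_stuck_alt, cond_eq]
  by_cases h : (PySem.List.pyRange 38 (((PySem.List.sorted xs (fun x => x) false).length : Int)) 1).any
      (fun i => PySem.List.pyGetD (PySem.List.sorted xs (fun x => x) false) (i - 38) 0 ==
                PySem.List.pyGetD (PySem.List.sorted xs (fun x => x) false) i 0) = true
  · simp only [h, if_true]
  · simp only [h]
    rw [tail_eq]
    by_cases h2 : (xs ++ [n]).length > 40
    · rw [if_pos h2, if_pos h2]
    · rw [if_neg h2, if_neg h2]
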